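-- pv_equiv track=rewrite | github.com/samidisjg/debugforge-bugfix-mas | src/bug_fixing_mas/fix_generator_agent/tool_patch_tool.py | normalize_generated_code
-- ===== SOURCE A (Python) =====
-- def normalize_generated_code(new_code: str) -> str:
--     """Clean generated code formatting without changing program behavior."""
--     lines = [line.rstrip() for line in new_code.replace("\r\n", "\n").replace("\r", "\n").split("\n")]
--
--     cleaned: list[str] = []
--     blank_streak = 0
--     for line in lines:
--         if line.strip() == "":
--             blank_streak += 1
--             if blank_streak <= 1:
--                 cleaned.append("")
--             continue
--         blank_streak = 0
--         cleaned.append(line)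
--
--     while cleaned and cleaned[0] == "":
--         cleaned.pop(0)
--     while cleaned and cleaned[-1] == "":
--         cleaned.pop()
--
--     normalized = "\n".join(cleaned)
--     if normalized:
--         normalized += "\n"
--     return normalized
-- ===== SOURCE B (Python) =====
-- def normalize_generated_code(new_code: str) -> str:
--     """Clean generated code formatting without changing program behavior."""
--     text = new_code.replace("\r\n", "\n").replace("\r", "\n")
--     paragraphs: list[str] = []
--     para: list[str] = []
--     for raw in text.split("\n"):
--         line = raw.rstrip()
--         if line:
--             para.append(line)
--         elif para:
--             paragraphs.append("\n".join(para))
--             para = []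
--     if para:
--         paragraphs.append("\n".join(para))
--     return "\n\n".join(paragraphs) + "\n" if paragraphs else ""
-- ===== Notes on version B (the rewrite author's own statement) =====
-- stated objective: alternative
-- what changed: B builds paragraphs (maximal runs of non-blank lines) in a single grouping pass and joins the paragraphs with one blank line, replacing A's blank-streak counter, cleaned-list construction and the two leading/trailing pop loops.
import Mathlib
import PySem

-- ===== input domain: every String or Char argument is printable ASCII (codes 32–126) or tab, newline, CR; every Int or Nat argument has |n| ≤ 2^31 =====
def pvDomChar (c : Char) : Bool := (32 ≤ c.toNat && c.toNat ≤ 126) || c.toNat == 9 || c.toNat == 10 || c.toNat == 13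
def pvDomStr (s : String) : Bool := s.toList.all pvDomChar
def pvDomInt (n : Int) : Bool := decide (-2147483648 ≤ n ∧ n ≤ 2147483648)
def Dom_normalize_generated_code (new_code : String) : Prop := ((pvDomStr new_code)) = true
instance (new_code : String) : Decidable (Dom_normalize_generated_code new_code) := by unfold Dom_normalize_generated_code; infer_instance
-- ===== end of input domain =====

-- B groups the lines into paragraphs of non-blank lines in one pass and joins the
-- paragraphs with one blank line, instead of A's blank-streak counter plus
-- leading/trailing pop loops (objective: alternative decomposition, same cost).

-- ===== PORT A =====
-- A's body, transliterated on List Char (wrapped to String below)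
def pvA_core (cs : List Char) : List Char :=
  let lines := (PySem.Chars.splitOn
      (PySem.Chars.replace (PySem.Chars.replace cs ['\r', '\n'] ['\n']) ['\r'] ['\n'])
      ['\n']).map PySem.Chars.rstrip
  let st := lines.foldl (fun (st : List (List Char) × Int) line =>
      if PySem.Chars.strip line == [] then
        -- blank_streak += 1; append "" only while blank_streak <= 1
        ((if st.2 + 1 ≤ 1 then st.1 ++ [([] : List Char)] else st.1), st.2 + 1)
      else (st.1 ++ [line], 0)) ([], 0)
  -- the two while-pop loops: drop leading then trailing empty lines
  let cleaned := ((st.1.dropWhile (· == [])).reverse.dropWhile (· == [])).reverse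
  let normalized := PySem.Chars.join ['\n'] cleaned
  if normalized == [] then normalized else normalized ++ ['\n']

def normalize_generated_code (new_code : String) : String :=
  String.ofList (pvA_core new_code.toList)

-- ===== PORT B =====
-- B's body, transliterated on List Char (wrapped to String below)
def pvB_core (cs : List Char) : List Char :=
  let text := PySem.Chars.replace (PySem.Chars.replace cs ['\r', '\n'] ['\n']) ['\r'] ['\n']
  let st := (PySem.Chars.splitOn text ['\n']).foldl
      (fun (st : List (List Char) × List (List Char)) raw =>
        let line := PySem.Chars.rstrip raw
        if line != [] then (st.1, st.2 ++ [line])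
        else if st.2 != [] then (st.1 ++ [PySem.Chars.join ['\n'] st.2], [])
        else st) ([], [])
  let paragraphs := if st.2 != [] then st.1 ++ [PySem.Chars.join ['\n'] st.2] else st.1
  if paragraphs != [] then PySem.Chars.join ['\n', '\n'] paragraphs ++ ['\n'] else []

def normalize_generated_code_alt (new_code : String) : String :=
  String.ofList (pvB_core new_code.toList)

-- ===== PRECONDITION & SPEC =====
def Spec_normalize_generated_code (new_code : String) (out : String) : Prop := out = normalize_generated_code_alt new_code
instance (new_code : String) (out : String) : Decidable (Spec_normalize_generated_code new_code out) := by unfold Spec_normalize_generated_code; infer_instance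

-- ===== CLAIM (what is proved, stated in full; the proofs are below) =====
def Claim_equal_normalize_generated_code : Prop := ∀ (new_code : String), Dom_normalize_generated_code new_code → Spec_normalize_generated_code new_code (normalize_generated_code new_code)

-- ===== LEMMAS AND PROOFS =====

-- A's loop, with the blank-streak counter reduced to the Bool "previous line was blank"
def pvG : List (List Char) → Bool → List (List Char)
  | [], _ => []
  | l :: ls, b =>
    if l = [] then (if b then pvG ls true else [] :: pvG ls true)
    else l :: pvG ls false

-- B's paragraph grouping, unjoined (a paragraph = its list of lines)
def pvPG : List (List Char) → List (List Char) → List (List (List Char))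
  | [], para => if para = [] then [] else [para]
  | l :: ls, para =>
    if l = [] then (if para = [] then pvPG ls [] else para :: pvPG ls [])
    else pvPG ls (para ++ [l])

-- trailing-blank trimming, as structural recursion
def pvTrim : List (List Char) → List (List Char)
  | [] => []
  | x :: xs =>
    match pvTrim xs with
    | [] => if x = [] then [] else [x]
    | r => x :: r

theorem pvTrim_cons (x : List Char) (xs : List (List Char)) :
    pvTrim (x :: xs) = (match pvTrim xs with
      | [] => if x = [] then [] else [x]
      | r => x :: r) := rfl

theorem pvTrim_cons_ne (x : List Char) (xs : List (List Char)) (h : pvTrim xs ≠ []) :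
    pvTrim (x :: xs) = x :: pvTrim xs := by
  rw [pvTrim_cons]
  cases h' : pvTrim xs with
  | nil => exact absurd h' h
  | cons a t => rfl

theorem pvTrim_cons_nil (x : List Char) (xs : List (List Char)) (h : pvTrim xs = []) :
    pvTrim (x :: xs) = if x = [] then [] else [x] := by
  rw [pvTrim_cons, h]

theorem pv_trim_cons_nonnil (l : List Char) (xs : List (List Char)) (hl : l ≠ []) :
    pvTrim (l :: xs) = l :: pvTrim xs := by
  by_cases h : pvTrim xs = []
  · rw [pvTrim_cons_nil _ _ h, h]; simp [hl]
  · exact pvTrim_cons_ne _ _ h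

theorem pv_dropWhile_all (p : Char → Bool) (l : List Char) (h : ∀ c ∈ List.dropWhile p l, p c = true) :
    List.dropWhile p l = [] := by
  by_contra hne
  have := List.head_dropWhile_not p hne
  have h2 := h _ (List.head_mem hne)
  rw [h2] at this
  exact absurd this (by simp)

theorem pv_strip_rstrip_nil_iff (r : List Char) :
    (PySem.Chars.strip (PySem.Chars.rstrip r) = [] ↔ PySem.Chars.rstrip r = []) := by
  constructor
  · intro h
    set y := PySem.Chars.rstrip r with hy
    simp only [PySem.Chars.strip, PySem.Chars.lstrip, PySem.Chars.rstrip,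
      List.reverse_eq_nil_iff, List.dropWhile_eq_nil_iff] at h
    have hall : ∀ c ∈ y, PySem.Chars.isspace c = true := by
      intro c hc
      rw [← List.takeWhile_append_dropWhile (p := PySem.Chars.isspace) (l := y)] at hc
      rcases List.mem_append.mp hc with h1 | h2
      · exact List.mem_takeWhile_imp h1
      · exact h _ (by simpa using h2)
    rw [hy, PySem.Chars.rstrip]
    simp only [List.reverse_eq_nil_iff]
    apply pv_dropWhile_all
    intro c hc
    have : c ∈ y := by
      rw [hy, PySem.Chars.rstrip, List.mem_reverse]
      exact hc
    exact hall c this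
  · intro h; rw [h]; rfl

theorem pv_dw (ls : List (List Char)) (b : Bool) :
    (pvG ls b).dropWhile (· == ([] : List Char)) = pvG ls true := by
  induction ls generalizing b with
  | nil => simp [pvG]
  | cons l ls ih =>
    by_cases hl : l = []
    · have h2 : pvG (l :: ls) true = pvG ls true := by simp [pvG, hl]
      cases b
      · have h1 : pvG (l :: ls) false = [] :: pvG ls true := by simp [pvG, hl]
        rw [h1, h2, List.dropWhile_cons]
        simpa using ih true
      · rw [h2]; exact ih true
    · simp [pvG, hl]

theorem pv_trimRev (xs : List (List Char)) :
    ((xs.reverse.dropWhile (· == ([] : List Char))).reverse) = pvTrim xs := by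
  induction xs with
  | nil => simp [pvTrim]
  | cons x xs ih =>
    rw [List.reverse_cons, List.dropWhile_append]
    by_cases he : (xs.reverse.dropWhile (· == ([] : List Char))) = []
    · have h0 : pvTrim xs = [] := by rw [← ih, he]; rfl
      rw [pvTrim_cons_nil _ _ h0]
      rw [he]
      by_cases hx : x = [] <;> simp [hx]
    · have h2 : pvTrim xs ≠ [] := by rw [← ih]; simpa using he
      rw [pvTrim_cons_ne _ _ h2]
      simp only [List.isEmpty_iff, he, if_false]
      rw [List.reverse_append, ← ih]
      simp

theorem pv_foldA (ls : List (List Char)) (acc : List (List Char)) (bs : Int)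
    (hbs : 0 ≤ bs) (H : ∀ l ∈ ls, (PySem.Chars.strip l = [] ↔ l = [])) :
    (ls.foldl (fun (st : List (List Char) × Int) line =>
      if PySem.Chars.strip line == [] then
        ((if st.2 + 1 ≤ 1 then st.1 ++ [([] : List Char)] else st.1), st.2 + 1)
      else (st.1 ++ [line], 0)) (acc, bs)).1 = acc ++ pvG ls (bs != 0) := by
  set f := (fun (st : List (List Char) × Int) line =>
      if PySem.Chars.strip line == [] then
        ((if st.2 + 1 ≤ 1 then st.1 ++ [([] : List Char)] else st.1), st.2 + 1)
      else (st.1 ++ [line], 0)) with hf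
  induction ls generalizing acc bs with
  | nil => simp [pvG]
  | cons l ls ih =>
    rw [List.foldl_cons]
    have hli := H l (by simp)
    have Hls : ∀ x ∈ ls, (PySem.Chars.strip x = [] ↔ x = []) := fun x hx => H x (by simp [hx])
    by_cases hl : l = []
    · have hstrip : PySem.Chars.strip l = [] := hli.mpr hl
      by_cases hb : bs = 0
      · have hstep : f (acc, bs) l = (acc ++ [([] : List Char)], bs + 1) := by
          rw [hf]; simp [hstrip, hb]
        rw [hstep, ih _ _ (by omega) Hls]
        simp [pvG, hl, hb, List.append_assoc]
      · have hstep : f (acc, bs) l = (acc, bs + 1) := by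
          rw [hf]; simp [hstrip]; omega
        rw [hstep, ih _ _ (by omega) Hls]
        have h1 : ((bs + 1) != 0) = true := by simp; omega
        have h2 : (bs != 0) = true := by simp [hb]
        simp [pvG, hl, h1, h2]
    · have hstrip : ¬ PySem.Chars.strip l = [] := fun h => hl (hli.mp h)
      have hstep : f (acc, bs) l = (acc ++ [l], (0 : Int)) := by
        rw [hf]; simp [hstrip]
      rw [hstep, ih _ _ (by omega) Hls]
      simp [pvG, hl, List.append_assoc]

theorem pv_foldB (ls : List (List Char)) (pars : List (List Char)) (para : List (List Char)) :
    (let st := ls.foldl (fun (st : List (List Char) × List (List Char)) line =>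
        if line != [] then (st.1, st.2 ++ [line])
        else if st.2 != [] then (st.1 ++ [PySem.Chars.join ['\n'] st.2], [])
        else st) (pars, para);
      (if st.2 != [] then st.1 ++ [PySem.Chars.join ['\n'] st.2] else st.1)) =
    pars ++ (pvPG ls para).map (PySem.Chars.join ['\n']) := by
  set f := (fun (st : List (List Char) × List (List Char)) line =>
        if line != [] then (st.1, st.2 ++ [line])
        else if st.2 != [] then (st.1 ++ [PySem.Chars.join ['\n'] st.2], [])
        else st) with hf
  induction ls generalizing pars para with
  | nil =>
    simp only [List.foldl_nil, pvPG]
    by_cases h : para = [] <;> simp [h]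
  | cons l ls ih =>
    rw [List.foldl_cons]
    by_cases hl : l = []
    · by_cases hp : para = []
      · have hstep : f (pars, para) l = (pars, ([] : List (List Char))) := by
          rw [hf]; simp [hl, hp]
        rw [hstep, ih]
        simp [pvPG, hl, hp]
      · have hstep : f (pars, para) l
            = (pars ++ [PySem.Chars.join ['\n'] para], ([] : List (List Char))) := by
          rw [hf]; simp [hl, hp]
        rw [hstep, ih]
        simp [pvPG, hl, hp, List.append_assoc]
    · have hstep : f (pars, para) l = (pars, para ++ [l]) := by
        rw [hf]; simp [hl]
      rw [hstep, ih]
      simp [pvPG, hl]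

theorem pv_pg_ne (ls : List (List Char)) (para : List (List Char))
    (h : ∀ l ∈ para, l ≠ []) :
    ∀ p ∈ pvPG ls para, p ≠ [] ∧ ∀ l ∈ p, l ≠ [] := by
  induction ls generalizing para with
  | nil =>
    intro p hp
    simp only [pvPG] at hp
    by_cases hpa : para = []
    · simp [hpa] at hp
    · simp [hpa] at hp
      subst hp
      exact ⟨hpa, h⟩
  | cons l ls ih =>
    intro p hp
    simp only [pvPG] at hp
    by_cases hl : l = []
    · by_cases hpa : para = []
      · simp only [hl, hpa, if_true] at hp
        exact ih [] (by simp) p hp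
      · simp only [hl, hpa, if_true, if_false, List.mem_cons] at hp
        rcases hp with rfl | hp
        · exact ⟨hpa, h⟩
        · exact ih [] (by simp) p hp
    · simp only [hl, if_false] at hp
      refine ih (para ++ [l]) ?_ p hp
      intro x hx
      rcases List.mem_append.mp hx with h1 | h2
      · exact h x h1
      · have : x = l := by simpa using h2
        rw [this]; exact hl

theorem pv_ic_single (p : List (List Char)) : List.intercalate [[]] [p] = p := by
  simp [List.intercalate]

theorem pv_ic_cons (p q : List (List Char)) (rest : List (List (List Char))) :
    List.intercalate [[]] (p :: q :: rest) = p ++ [] :: List.intercalate [[]] (q :: rest) := by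
  simp [List.intercalate, List.intersperse]

theorem pv_ic_ne (p : List (List Char)) (rest : List (List (List Char))) (hp : p ≠ []) :
    List.intercalate [[]] (p :: rest) ≠ [] := by
  cases rest with
  | nil => rw [pv_ic_single]; exact hp
  | cons q t => rw [pv_ic_cons]; simp [hp]

theorem pv_big (ls : List (List Char)) :
    pvTrim (pvG ls true) = List.intercalate [[]] (pvPG ls []) ∧
    ∀ para, para ≠ [] →
      List.intercalate [[]] (pvPG ls para) = para ++ pvTrim (pvG ls false) := by
  induction ls with
  | nil =>
    constructor
    · rfl
    · intro para hpa
      simp [pvPG, pvG, pvTrim, hpa, pv_ic_single]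
  | cons l ls ih =>
    obtain ⟨ih1, ih2⟩ := ih
    by_cases hl : l = []
    · have hg1 : pvG (l :: ls) true = pvG ls true := by simp [pvG, hl]
      have hg0 : pvG (l :: ls) false = [] :: pvG ls true := by simp [pvG, hl]
      have hpg0 : pvPG (l :: ls) [] = pvPG ls [] := by simp [pvPG, hl]
      constructor
      · rw [hg1, hpg0]; exact ih1
      · intro para hpa
        have hpgp : pvPG (l :: ls) para = para :: pvPG ls [] := by simp [pvPG, hl, hpa]
        rw [hpgp, hg0]
        cases hps : pvPG ls [] with
        | nil =>
          rw [pv_ic_single]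
          have htr : pvTrim (pvG ls true) = [] := by rw [ih1, hps]; rfl
          rw [pvTrim_cons_nil _ _ htr]
          simp
        | cons p rest =>
          have hpne : p ≠ [] := (pv_pg_ne ls [] (by simp) p (by rw [hps]; simp)).1
          have hicne : List.intercalate [[]] (p :: rest) ≠ [] := pv_ic_ne p rest hpne
          have htr : pvTrim (pvG ls true) ≠ [] := by rw [ih1, hps]; exact hicne
          rw [pv_ic_cons, pvTrim_cons_ne _ _ htr, ih1, hps]
    · have hg1 : pvG (l :: ls) true = l :: pvG ls false := by simp [pvG, hl]
      have hg0 : pvG (l :: ls) false = l :: pvG ls false := by simp [pvG, hl]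
      have hpg0 : pvPG (l :: ls) [] = pvPG ls [l] := by simp [pvPG, hl]
      constructor
      · rw [hg1, hpg0, pv_trim_cons_nonnil _ _ hl, ih2 [l] (by simp)]
        rfl
      · intro para hpa
        have hpgp : pvPG (l :: ls) para = pvPG ls (para ++ [l]) := by simp [pvPG, hl]
        rw [hpgp, hg0, pv_trim_cons_nonnil _ _ hl, ih2 (para ++ [l]) (by simp)]
        simp

theorem pv_join_ne (sep l : List Char) (q : List (List Char)) (hl : l ≠ []) :
    PySem.Chars.join sep (l :: q) ≠ [] := by
  cases q with
  | nil => rw [PySem.Chars.join_singleton]; exact hl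
  | cons a t => rw [PySem.Chars.join_cons_cons]; simp [hl]

theorem pv_joinApp (sep : List Char) (xs ys : List (List Char)) (hx : xs ≠ []) (hy : ys ≠ []) :
    PySem.Chars.join sep (xs ++ ys) = PySem.Chars.join sep xs ++ sep ++ PySem.Chars.join sep ys := by
  induction xs with
  | nil => exact absurd rfl hx
  | cons x xs ih =>
    cases xs with
    | nil =>
      cases ys with
      | nil => exact absurd rfl hy
      | cons y t =>
        rw [List.singleton_append, PySem.Chars.join_cons_cons, PySem.Chars.join_singleton]
    | cons x2 t2 =>
      have ih' := ih (by simp)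
      simp only [List.cons_append] at ih' ⊢
      rw [PySem.Chars.join_cons_cons, ih', PySem.Chars.join_cons_cons]
      simp [List.append_assoc]

theorem pv_join2 (ps : List (List (List Char))) (h : ∀ p ∈ ps, p ≠ []) :
    PySem.Chars.join ['\n'] (List.intercalate [[]] ps) =
    PySem.Chars.join ['\n', '\n'] (ps.map (PySem.Chars.join ['\n'])) := by
  induction ps with
  | nil => rfl
  | cons p rest ih =>
    cases rest with
    | nil => rw [pv_ic_single]; simp [PySem.Chars.join_singleton]
    | cons q t =>
      rw [pv_ic_cons]
      simp only [List.map_cons]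
      rw [PySem.Chars.join_cons_cons]
      have hp : p ≠ [] := h p (by simp)
      have hq : q ≠ [] := h q (by simp)
      have hrest : ∀ x ∈ q :: t, x ≠ [] := fun x hx => h x (by simp [hx])
      have hicne : List.intercalate [[]] (q :: t) ≠ [] := pv_ic_ne q t hq
      rw [pv_joinApp _ _ _ hp (by simp)]
      cases hic : List.intercalate [[]] (q :: t) with
      | nil => exact absurd hic hicne
      | cons a b =>
        rw [PySem.Chars.join_cons_cons]
        rw [← hic, ih hrest]
        simp [List.append_assoc]

theorem pv_core_eq (cs : List Char) : pvA_core cs = pvB_core cs := by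
  set raw := PySem.Chars.splitOn
      (PySem.Chars.replace (PySem.Chars.replace cs ['\r', '\n'] ['\n']) ['\r'] ['\n'])
      ['\n'] with hraw
  set ls := raw.map PySem.Chars.rstrip with hls
  -- both ports, zeta/beta-reduced (definitional)
  have hA : pvA_core cs =
      (if PySem.Chars.join ['\n']
            ((((ls.foldl (fun (st : List (List Char) × Int) line =>
                if PySem.Chars.strip line == [] then
                  ((if st.2 + 1 ≤ 1 then st.1 ++ [([] : List Char)] else st.1), st.2 + 1)
                else (st.1 ++ [line], 0)) ([], 0)).1.dropWhile
              (· == ([] : List Char))).reverse.dropWhile (· == ([] : List Char))).reverse) == []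
        then PySem.Chars.join ['\n']
            ((((ls.foldl (fun (st : List (List Char) × Int) line =>
                if PySem.Chars.strip line == [] then
                  ((if st.2 + 1 ≤ 1 then st.1 ++ [([] : List Char)] else st.1), st.2 + 1)
                else (st.1 ++ [line], 0)) ([], 0)).1.dropWhile
              (· == ([] : List Char))).reverse.dropWhile (· == ([] : List Char))).reverse)
        else PySem.Chars.join ['\n']
            ((((ls.foldl (fun (st : List (List Char) × Int) line =>
                if PySem.Chars.strip line == [] then
                  ((if st.2 + 1 ≤ 1 then st.1 ++ [([] : List Char)] else st.1), st.2 + 1)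
                else (st.1 ++ [line], 0)) ([], 0)).1.dropWhile
              (· == ([] : List Char))).reverse.dropWhile (· == ([] : List Char))).reverse) ++ ['\n']) := rfl
  have hB : pvB_core cs =
      (let st := raw.foldl (fun (st : List (List Char) × List (List Char)) r =>
          if PySem.Chars.rstrip r != [] then (st.1, st.2 ++ [PySem.Chars.rstrip r])
          else if st.2 != [] then (st.1 ++ [PySem.Chars.join ['\n'] st.2], [])
          else st) ([], [])
       let paragraphs := if st.2 != [] then st.1 ++ [PySem.Chars.join ['\n'] st.2] else st.1
       if paragraphs != [] then PySem.Chars.join ['\n', '\n'] paragraphs ++ ['\n'] else []) := rfl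
  -- A's fold and trims produce the paragraphs interspersed with single blank lines
  have hHA : ∀ l ∈ ls, (PySem.Chars.strip l = [] ↔ l = []) := by
    intro l hl
    obtain ⟨r, _, rfl⟩ := List.mem_map.mp (hls ▸ hl)
    exact pv_strip_rstrip_nil_iff r
  have hclean : (((ls.foldl (fun (st : List (List Char) × Int) line =>
          if PySem.Chars.strip line == [] then
            ((if st.2 + 1 ≤ 1 then st.1 ++ [([] : List Char)] else st.1), st.2 + 1)
          else (st.1 ++ [line], 0)) ([], 0)).1.dropWhile
        (· == ([] : List Char))).reverse.dropWhile (· == ([] : List Char))).reverse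
      = List.intercalate [[]] (pvPG ls []) := by
    rw [pv_foldA ls [] 0 (by omega) hHA]
    have h00 : ((0 : Int) != 0) = false := by simp
    rw [h00, List.nil_append, pv_dw, pv_trimRev, (pv_big ls).1]
  rw [hA, hB, hclean]
  -- B's fold produces the joined paragraphs
  have hfbm : raw.foldl (fun (st : List (List Char) × List (List Char)) r =>
          if PySem.Chars.rstrip r != [] then (st.1, st.2 ++ [PySem.Chars.rstrip r])
          else if st.2 != [] then (st.1 ++ [PySem.Chars.join ['\n'] st.2], [])
          else st) ([], [])
      = ls.foldl (fun (st : List (List Char) × List (List Char)) line =>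
          if line != [] then (st.1, st.2 ++ [line])
          else if st.2 != [] then (st.1 ++ [PySem.Chars.join ['\n'] st.2], [])
          else st) ([], []) := by
    rw [hls]
    exact (List.foldl_map (f := PySem.Chars.rstrip)
      (g := fun (st : List (List Char) × List (List Char)) line =>
          if line != [] then (st.1, st.2 ++ [line])
          else if st.2 != [] then (st.1 ++ [PySem.Chars.join ['\n'] st.2], [])
          else st) (l := raw) (init := ([], []))).symm
  have hfb := pv_foldB ls [] []
  simp only [List.nil_append] at hfb
  show (if (PySem.Chars.join ['\n'] (List.intercalate [[]] (pvPG ls [])) == []) = true then _ else _) = _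
  rw [hfbm]
  simp only []
  rw [hfb]
  -- final case split on whether there is any paragraph
  have hper := pv_pg_ne ls [] (by simp)
  cases hcase : pvPG ls [] with
  | nil => simp [List.intercalate]
  | cons p rest =>
    have hp := hper p (by rw [hcase]; simp)
    obtain ⟨l, p', rfl⟩ : ∃ l p', p = l :: p' := by
      cases p with
      | nil => exact absurd rfl hp.1
      | cons a b => exact ⟨a, b, rfl⟩
    have hlne : l ≠ [] := hp.2 l (by simp)
    have hq : ∃ q, List.intercalate [[]] ((l :: p') :: rest) = l :: q := by
      cases rest with
      | nil => exact ⟨p', by rw [pv_ic_single]⟩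
      | cons r t => exact ⟨p' ++ [] :: List.intercalate [[]] (r :: t), by rw [pv_ic_cons]; rfl⟩
    obtain ⟨q, hq⟩ := hq
    have hjne : PySem.Chars.join ['\n'] (List.intercalate [[]] ((l :: p') :: rest)) ≠ [] := by
      rw [hq]; exact pv_join_ne _ _ _ hlne
    have hall : ∀ x ∈ (l :: p') :: rest, x ≠ [] := by
      intro x hx
      exact (hper x (by rw [hcase]; exact hx)).1
    simp only [beq_iff_eq, bne_iff_ne, ne_eq]
    rw [if_neg hjne, pv_join2 _ hall]
    simp

-- ===== VERDICT (by name: the statement is the Claim_ definition above) =====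
theorem normalize_generated_code_spec : Claim_equal_normalize_generated_code := by
  intro nc _
  show _ = _
  unfold normalize_generated_code normalize_generated_code_alt
  rw [pv_core_eq]
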